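-- pv_equiv track=rewrite | github.com/mmoisse/cp3 | jens_pipeline_cp3/script_storage/rerun_analysis.py | disorder
-- ===== SOURCE A (Python) =====
-- def disorder(file_lines, filter_length):
--     regions = []
--     name = ""
--     span_dict = {}
--
--     for x in file_lines:
--         # Continue if line is empty
--         if x[0] == "\n":
--             continue
--
--         # Name is set according to identifier '>'
--         if x.startswith(">"):
--             x = x.rstrip("\n")
--             name = x[1:]
--
--         # If end of span for protein, append placeholder regions to full dictionary
--         if x.startswith("#"):
--             regions = [j for i in regions for j in i]
--             span_dict[name] = regions
--             name = ""
--             regions = []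
--
--         # If line is not identifier or end, append number to placeholder 'regions'
--         if x[0] != ">" and x[0] != "#" and x[0] != "\n":
--             x = x.rstrip("\n")
--             x = x.split('-')
--             y = int(x[1])
--             z = int(x[0])
--             x = y + 1 - z
--
--             # If length of span below filter length, simply ignore the span and continue
--             if filter_length > 0:
--                 if x <= filter_length:
--                     continue
--                 else:
--                     regions.append(range(z, y + 1))
--             else:
--                 regions.append(range(z, y + 1))
--         else:
--             continue
--     return span_dict
-- ===== SOURCE B (Python) =====
-- def disorder(file_lines, filter_length):
--     # Buffer lines into groups terminated by a '#' line; materialise a group's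
--     # (name, flat position list) only when its terminator arrives.
--     span_dict = {}
--     group = []
--     for line in file_lines:
--         if line.startswith("\n"):
--             continue
--         if line.startswith("#"):
--             name = ""
--             positions = []
--             for g in group:
--                 if g.startswith(">"):
--                     name = g.rstrip("\n")[1:]
--                 else:
--                     parts = g.rstrip("\n").split("-")
--                     z = int(parts[0])
--                     y = int(parts[1])
--                     if filter_length > 0 and y + 1 - z <= filter_length:
--                         continue
--                     positions.extend(range(z, y + 1))
--             span_dict[name] = positions
--             group = []
--         else:
--             group.append(line)
--     return span_dict
-- ===== Notes on version B (the rewrite author's own statement) =====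
-- stated objective: alternative
-- what changed: B buffers lines into '#'-terminated groups and processes each group at its terminator, building the flat position list directly with extend, instead of A's running name/regions state with a list-of-ranges flattened by a comprehension at each '#'.
import Mathlib
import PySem

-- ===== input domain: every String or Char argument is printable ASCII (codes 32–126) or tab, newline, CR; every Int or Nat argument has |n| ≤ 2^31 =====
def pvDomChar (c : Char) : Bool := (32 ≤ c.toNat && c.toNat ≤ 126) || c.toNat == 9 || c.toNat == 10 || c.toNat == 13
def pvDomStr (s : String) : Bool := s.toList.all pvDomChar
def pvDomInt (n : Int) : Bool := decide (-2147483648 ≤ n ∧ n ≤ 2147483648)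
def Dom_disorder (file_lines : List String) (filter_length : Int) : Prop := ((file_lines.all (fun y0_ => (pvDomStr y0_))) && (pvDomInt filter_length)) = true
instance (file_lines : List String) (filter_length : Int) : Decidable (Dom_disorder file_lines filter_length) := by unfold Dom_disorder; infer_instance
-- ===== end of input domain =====

-- B processes '#'-terminated groups of buffered lines instead of A's running name/regions
-- state with a flatten-at-'#' comprehension; same cost, different decomposition (objective: alternative).

-- s.rstrip("\n"): drop all trailing '\n' characters (ported by hand; exact for chars-argument rstrip)
def pvRstripNL (s : String) : String := String.ofList ((s.toList.reverse.dropWhile (fun c => c == '\n')).reverse)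

-- ===== PORT A =====
-- loop body of A; state = (regions, name, span_dict); the `[]`/parse-failure fallbacks are
-- inputs where Python raises IndexError/ValueError, excluded by Pre_disorder
def pvStepA (filter_length : Int)
    (st : List (List Int) × String × PySem.Dict String (List Int)) (x : String) :
    List (List Int) × String × PySem.Dict String (List Int) :=
  match st with
  | (regions, name, span_dict) =>
    match x.toList with
    | [] => (regions, name, span_dict)          -- x[0] raises IndexError
    | c :: _ =>
      if c = '\n' then (regions, name, span_dict)
      else
        -- after rstrip, x still starts with c, so later x[0] tests stay tests of c
        let x := if c = '>' then pvRstripNL x else x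
        let name := if c = '>' then String.ofList (x.toList.drop 1) else name
        let st2 :=
          if c = '#' then (([] : List (List Int)), "", span_dict.insert name regions.flatten)
          else (regions, name, span_dict)
        match st2 with
        | (regions, name, span_dict) =>
          if c ≠ '>' ∧ c ≠ '#' then
            let x := pvRstripNL x
            let parts := PySem.Chars.splitOn x.toList ['-']
            match PySem.List.pyGet? parts 1, PySem.List.pyGet? parts 0 with
            | some s1, some s0 =>
              match PySem.Int.ofChars? s1, PySem.Int.ofChars? s0 with
              | some y, some z =>
                if filter_length > 0 then
                  if y + 1 - z ≤ filter_length then (regions, name, span_dict)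
                  else (regions ++ [PySem.List.pyRange z (y + 1) 1], name, span_dict)
                else (regions ++ [PySem.List.pyRange z (y + 1) 1], name, span_dict)
              | _, _ => (regions, name, span_dict)      -- int() raises ValueError
            | _, _ => (regions, name, span_dict)        -- x[1] raises IndexError
          else (regions, name, span_dict)

def disorder (file_lines : List String) (filter_length : Int) : List (String × List Int) :=
  ((file_lines.foldl (pvStepA filter_length)
      (([] : List (List Int)), "", (PySem.Dict.empty : PySem.Dict String (List Int)))).2.2).items

-- ===== PORT B =====
-- inner loop of B: fold one buffered group into (name, positions)
def pvGroupStep (filter_length : Int) (st : String × List Int) (g : String) : String × List Int :=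
  match st with
  | (name, positions) =>
    if PySem.Str.startswith g ">" then (String.ofList ((pvRstripNL g).toList.drop 1), positions)
    else
      let parts := PySem.Chars.splitOn (pvRstripNL g).toList ['-']
      match PySem.List.pyGet? parts 0, PySem.List.pyGet? parts 1 with
      | some s0, some s1 =>
        match PySem.Int.ofChars? s0, PySem.Int.ofChars? s1 with
        | some z, some y =>
          if filter_length > 0 ∧ y + 1 - z ≤ filter_length then (name, positions)
          else (name, positions ++ PySem.List.pyRange z (y + 1) 1)
        | _, _ => (name, positions)                     -- int() raises ValueError
      | _, _ => (name, positions)                       -- parts[0]/parts[1] raises IndexError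

-- outer loop body of B; state = (span_dict, group)
def pvStepB (filter_length : Int)
    (st : PySem.Dict String (List Int) × List String) (line : String) :
    PySem.Dict String (List Int) × List String :=
  match st with
  | (span_dict, group) =>
    if PySem.Str.startswith line "\n" then (span_dict, group)
    else if PySem.Str.startswith line "#" then
      match group.foldl (pvGroupStep filter_length) ("", ([] : List Int)) with
      | (name, positions) => (span_dict.insert name positions, ([] : List String))
    else (span_dict, group ++ [line])

def disorder_alt (file_lines : List String) (filter_length : Int) : List (String × List Int) :=
  ((file_lines.foldl (pvStepB filter_length)
      ((PySem.Dict.empty : PySem.Dict String (List Int)), ([] : List String))).1).items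

-- ===== PRECONDITION & SPEC =====
-- a line on which A's loop body returns normally: nonempty, and if it is a span line
-- (first char not '\n'/'>'/'#') it splits on '-' into ≥ 2 parts whose first two parse as int
def pvLineOK (s : String) : Bool :=
  match s.toList with
  | [] => false
  | c :: _ =>
    if c = '\n' ∨ c = '>' ∨ c = '#' then true
    else
      let parts := PySem.Chars.splitOn (pvRstripNL s).toList ['-']
      decide (2 ≤ parts.length)
        && ((PySem.List.pyGet? parts 0).bind PySem.Int.ofChars?).isSome
        && ((PySem.List.pyGet? parts 1).bind PySem.Int.ofChars?).isSome

-- Pre_ excludes exactly the inputs on which Python A raises (IndexError on an empty line or a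
-- span line without '-', ValueError on an unparsable span bound); A returns on all others.
def Pre_disorder (file_lines : List String) (filter_length : Int) : Prop :=
  file_lines.all pvLineOK = true

instance (file_lines : List String) (filter_length : Int) : Decidable (Pre_disorder file_lines filter_length) := by unfold Pre_disorder; infer_instance

def pvWitness_disorder : List String × Int := ([">p1\n", "1-3\n", "10-11\n", "#\n"], 2)

def Spec_disorder (file_lines : List String) (filter_length : Int) (out : List (String × List Int)) : Prop := out = disorder_alt file_lines filter_length
instance (file_lines : List String) (filter_length : Int) (out : List (String × List Int)) : Decidable (Spec_disorder file_lines filter_length out) := by unfold Spec_disorder; infer_instance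

-- ===== CLAIM (what is proved, stated in full; the proofs are below) =====
def Claim_equal_disorder : Prop := ∀ (file_lines : List String) (filter_length : Int), Dom_disorder file_lines filter_length → Pre_disorder file_lines filter_length → Spec_disorder file_lines filter_length (disorder file_lines filter_length)

-- ===== LEMMAS AND PROOFS =====

-- startswith against a single-character pattern is a test of the first character
theorem pv_sw (c : Char) (rest : List Char) (a : Char) :
    PySem.Chars.startswith (c :: rest) [a] = (a == c) := by
  simp [PySem.Chars.startswith, List.isPrefixOf]

-- evaluation of A's body on a span line
set_option maxHeartbeats 1000000 in
theorem pvA_span (fl : Int) (x : String) (c : Char) (rest : List Char) (hx : x.toList = c :: rest)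
    (hc1 : ¬ c = '\n') (hc2 : ¬ c = '>') (hc3 : ¬ c = '#')
    (s0 s1 : List Char) (z y : Int)
    (hp0 : PySem.List.pyGet? (PySem.Chars.splitOn (pvRstripNL x).toList ['-']) 0 = some s0)
    (hp1 : PySem.List.pyGet? (PySem.Chars.splitOn (pvRstripNL x).toList ['-']) 1 = some s1)
    (hz : PySem.Int.ofChars? s0 = some z) (hy : PySem.Int.ofChars? s1 = some y)
    (regions : List (List Int)) (name : String) (d : PySem.Dict String (List Int)) :
    pvStepA fl (regions, name, d) x =
      (if fl > 0 ∧ y + 1 - z ≤ fl then regions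
       else regions ++ [PySem.List.pyRange z (y + 1) 1], name, d) := by
  simp only [pvStepA, hx]
  rw [if_neg hc1, if_neg hc2, if_neg hc2, if_neg hc3, if_pos ⟨hc2, hc3⟩]
  rw [hp1, hp0]
  simp [hy, hz]
  split_ifs <;> first | rfl | (exfalso; omega)

-- evaluation of B's group fold on a span line
set_option maxHeartbeats 1000000 in
theorem pvG_span (fl : Int) (x : String) (c : Char) (rest : List Char) (hx : x.toList = c :: rest)
    (hc2 : ¬ c = '>')
    (s0 s1 : List Char) (z y : Int)
    (hp0 : PySem.List.pyGet? (PySem.Chars.splitOn (pvRstripNL x).toList ['-']) 0 = some s0)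
    (hp1 : PySem.List.pyGet? (PySem.Chars.splitOn (pvRstripNL x).toList ['-']) 1 = some s1)
    (hz : PySem.Int.ofChars? s0 = some z) (hy : PySem.Int.ofChars? s1 = some y)
    (name : String) (positions : List Int) :
    pvGroupStep fl (name, positions) x =
      (name, if fl > 0 ∧ y + 1 - z ≤ fl then positions
             else positions ++ PySem.List.pyRange z (y + 1) 1) := by
  simp only [pvGroupStep]
  rw [show PySem.Str.startswith x ">" = false by simp [hx, pv_sw, Ne.symm hc2]]
  simp only [Bool.false_eq_true, if_false]
  rw [hp0, hp1]
  simp [hz, hy]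
  split_ifs <;> rfl

-- B's outer body only buffers a line that is neither skipped nor a terminator
set_option maxHeartbeats 1000000 in
theorem pvB_nonterm (fl : Int) (x : String) (c : Char) (rest : List Char) (hx : x.toList = c :: rest)
    (hc1 : ¬ c = '\n') (hc3 : ¬ c = '#')
    (d : PySem.Dict String (List Int)) (group : List String) :
    pvStepB fl (d, group) x = (d, group ++ [x]) := by
  simp [pvStepB, hx, pv_sw, Ne.symm hc1, Ne.symm hc3]

-- the invariant: B's buffered group folds to A's current (name, flattened regions),
-- so pushing one good line through A's body and through B's body preserves agreement.
set_option maxHeartbeats 1000000 in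
theorem pv_invariant (filter_length : Int) :
    ∀ (lines : List String), (∀ l ∈ lines, pvLineOK l = true) →
    ∀ (regions : List (List Int)) (name : String) (d : PySem.Dict String (List Int))
      (group : List String),
      group.foldl (pvGroupStep filter_length) ("", ([] : List Int)) = (name, regions.flatten) →
      (lines.foldl (pvStepA filter_length) (regions, name, d)).2.2 =
      (lines.foldl (pvStepB filter_length) (d, group)).1 := by
  intro lines
  induction lines with
  | nil => intro _ regions name d group _; simp
  | cons x lines ih =>
    intro hl regions name d group hg
    have hok : pvLineOK x = true := hl x (List.mem_cons_self)
    have hl' : ∀ l ∈ lines, pvLineOK l = true := fun l hm => hl l (List.mem_cons_of_mem _ hm)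
    cases hx : x.toList with
    | nil => simp [pvLineOK, hx] at hok
    | cons c rest =>
      simp only [List.foldl_cons]
      by_cases hc1 : c = '\n'
      · -- empty line: both sides skip it
        subst hc1
        have hA : pvStepA filter_length (regions, name, d) x = (regions, name, d) := by
          simp [pvStepA, hx]
        have hB : pvStepB filter_length (d, group) x = (d, group) := by
          simp [pvStepB, hx, pv_sw]
        rw [hA, hB]; exact ih hl' regions name d group hg
      · by_cases hc2 : c = '>'
        · -- header line: A rebinds name, B buffers the line
          subst hc2
          have hA : pvStepA filter_length (regions, name, d) x =
              (regions, String.ofList ((pvRstripNL x).toList.drop 1), d) := by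
            simp [pvStepA, hx]
          have hB : pvStepB filter_length (d, group) x = (d, group ++ [x]) := by
            simp [pvStepB, hx, pv_sw]
          rw [hA, hB]
          apply ih hl'
          rw [List.foldl_append, hg]
          simp [pvGroupStep, hx, pv_sw]
        · by_cases hc3 : c = '#'
          · -- terminator line: A stores flattened regions, B materialises the group
            subst hc3
            have hA : pvStepA filter_length (regions, name, d) x =
                ([], "", d.insert name regions.flatten) := by
              simp [pvStepA, hx]
            have hB : pvStepB filter_length (d, group) x =
                (d.insert name regions.flatten, []) := by
              simp [pvStepB, hx, pv_sw, hg]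
            rw [hA, hB]
            exact ih hl' [] "" (d.insert name regions.flatten) [] (by simp)
          · -- span line: extract the two parsed bounds from pvLineOK
            have hok' := hok
            simp only [pvLineOK, hx] at hok'
            rw [if_neg (by simp [hc1, hc2, hc3])] at hok'
            obtain ⟨⟨hlen, h0⟩, h1⟩ := by
              simpa [Bool.and_eq_true] using hok'
            obtain ⟨s0, hp0, z, hz⟩ : ∃ s0, PySem.List.pyGet?
                (PySem.Chars.splitOn (pvRstripNL x).toList ['-']) 0 = some s0 ∧
                ∃ z, PySem.Int.ofChars? s0 = some z := by
              cases hp : PySem.List.pyGet? (PySem.Chars.splitOn (pvRstripNL x).toList ['-']) 0 with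
              | none => rw [hp] at h0; simp at h0
              | some s => rw [hp] at h0; simp at h0
                          obtain ⟨z, hz⟩ := Option.isSome_iff_exists.mp (by simpa using h0)
                          exact ⟨s, rfl, z, hz⟩
            obtain ⟨s1, hp1, y, hy⟩ : ∃ s1, PySem.List.pyGet?
                (PySem.Chars.splitOn (pvRstripNL x).toList ['-']) 1 = some s1 ∧
                ∃ y, PySem.Int.ofChars? s1 = some y := by
              cases hp : PySem.List.pyGet? (PySem.Chars.splitOn (pvRstripNL x).toList ['-']) 1 with
              | none => rw [hp] at h1; simp at h1
              | some s => rw [hp] at h1; simp at h1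
                          obtain ⟨y, hy⟩ := Option.isSome_iff_exists.mp (by simpa using h1)
                          exact ⟨s, rfl, y, hy⟩
            rw [pvA_span filter_length x c rest hx hc1 hc2 hc3 s0 s1 z y hp0 hp1 hz hy,
              pvB_nonterm filter_length x c rest hx hc1 hc3]
            split_ifs with hf
            · -- span filtered out on both sides
              apply ih hl'
              rw [List.foldl_append, hg]
              simp only [List.foldl_cons, List.foldl_nil]
              rw [pvG_span filter_length x c rest hx hc2 s0 s1 z y hp0 hp1 hz hy]
              rw [if_pos hf]
            · -- span kept on both sides
              apply ih hl'
              rw [List.foldl_append, hg]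
              simp only [List.foldl_cons, List.foldl_nil]
              rw [pvG_span filter_length x c rest hx hc2 s0 s1 z y hp0 hp1 hz hy]
              rw [if_neg hf]
              simp

-- ===== VERDICT (by name: the statement is the Claim_ definition above) =====
theorem disorder_spec : Claim_equal_disorder := by
  intro file_lines filter_length _ hpre
  unfold Spec_disorder disorder disorder_alt
  rw [pv_invariant filter_length file_lines (List.all_eq_true.mp hpre) [] "" PySem.Dict.empty []
    (by simp)]
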